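-- pv_equiv track=rewrite | github.com/AnudeepGunukula/PythonScripts | MNC/prog35.py | removeProduct
-- ===== SOURCE A (Python) =====
-- def removeProduct(num,ids,rem):
--   arr=ids
--   n=num
--   mi=rem
--   m = {}
--   v = []
--   count = 0
--
--   for i in range(n):
--     if arr[i] in m:
--       m[arr[i]] += 1
--     else:
--       m[arr[i]] = 1
--
--   for i in m:
--     v.append([m[i],i])
--
--   v.sort()
--   size = len(v)
--
--   for i in range(size):
--     if (v[i][0] <= mi):
--       mi -= v[i][0]
--       count += 1
--     else:
--       return size - count
--   return size - count
-- ===== SOURCE B (Python) =====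
-- def removeProduct(num, ids, rem):
--     freq = {}
--     for i in range(num):
--         x = ids[i]
--         freq[x] = freq.get(x, 0) + 1
--     buckets = [0] * (num + 1)
--     for f in freq.values():
--         buckets[f] += 1
--     distinct = len(freq)
--     left = rem
--     for f in range(1, num + 1):
--         c = buckets[f]
--         take = max(0, min(c, left // f))
--         distinct -= take
--         left -= take * f
--         if take < c:
--             break
--     return distinct
-- ===== Notes on version B (the rewrite author's own statement) =====
-- stated objective: alternative
-- what changed: A builds a count dict, materialises (count,id) pairs, comparison-sorts them and greedily removes one group per iteration; B never sorts: it bins the counts into frequency buckets (counting sort) and processes each frequency 1..num with one closed-form arithmetic step (take = min(bucket, left//f)).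
-- outside the precondition, e.g. on removeProduct(3, [1, 2], 0): A raises IndexError, B raises IndexError
import Mathlib
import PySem

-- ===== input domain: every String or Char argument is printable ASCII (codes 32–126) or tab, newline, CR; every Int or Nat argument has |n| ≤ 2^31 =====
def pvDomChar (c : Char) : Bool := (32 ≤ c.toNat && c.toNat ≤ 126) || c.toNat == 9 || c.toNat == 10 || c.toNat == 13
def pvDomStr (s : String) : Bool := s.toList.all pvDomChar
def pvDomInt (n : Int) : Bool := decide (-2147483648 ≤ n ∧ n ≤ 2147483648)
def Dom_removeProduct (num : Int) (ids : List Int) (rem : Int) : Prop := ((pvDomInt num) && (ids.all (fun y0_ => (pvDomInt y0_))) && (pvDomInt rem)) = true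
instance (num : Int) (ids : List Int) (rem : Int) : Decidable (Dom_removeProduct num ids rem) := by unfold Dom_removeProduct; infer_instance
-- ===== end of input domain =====

-- B replaces A's sort of (count,id) pairs by frequency buckets processed with one arithmetic step per
-- frequency value (no sort); equivalence of the return values is proved on Pre_ (num ≤ len(ids)).

-- ===== PORT A =====
def removeProduct (num : Int) (ids : List Int) (rem : Int) : Int :=
  let m : PySem.Dict Int Int :=
    (PySem.List.pyRange 0 num 1).foldl (fun m i =>
      let x := PySem.List.pyGetD ids i 0      -- arr[i]; in range under Pre_
      match m.get? x with
      | some c => m.insert x (c + 1)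
      | none => m.insert x 1) PySem.Dict.empty
  -- 'for i in m: v.append([m[i], i])' — the 2-element list [m[i], i] is ported as the pair (m[i], i)
  let v : List (Int × Int) := m.keys.foldl (fun acc k => acc ++ [(m.getD k 0, k)]) []
  -- v.sort(): Python's lexicographic sort of the 2-element lists = tuple-key sort by (fst, snd)
  let v2 := PySem.List.sorted2 v (·.1) (·.2)
  let size : Int := PySem.List.len v2
  let res := (PySem.List.pyRange 0 size 1).foldl (fun st i =>
      match st with
      | Sum.inr r => Sum.inr r
      | Sum.inl (mi, count) =>
          let p := PySem.List.pyGetD v2 i (0, 0)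
          if p.1 ≤ mi then Sum.inl (mi - p.1, count + 1) else Sum.inr (size - count))
    (Sum.inl (rem, (0 : Int)))
  match res with
  | Sum.inl (_, count) => size - count
  | Sum.inr r => r

-- ===== PORT B =====
def removeProduct_alt (num : Int) (ids : List Int) (rem : Int) : Int :=
  let freq : PySem.Dict Int Int :=
    (PySem.List.pyRange 0 num 1).foldl (fun d i =>
      let x := PySem.List.pyGetD ids i 0      -- ids[i]; in range under Pre_
      d.insert x (d.getD x 0 + 1)) PySem.Dict.empty
  let buckets0 : List Int := PySem.List.pyRepeat [0] (num + 1)        -- [0]*(num+1)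
  let buckets := freq.values.foldl (fun bs f =>
      PySem.List.pySetD bs f (PySem.List.pyGetD bs f 0 + 1)) buckets0 -- buckets[f] += 1 (f in range: 1 ≤ f ≤ num)
  let distinct : Int := (freq.size : Int)
  let st := (PySem.List.pyRange 1 (num + 1) 1).foldl (fun st f =>
      if st.2.2 then st                                               -- loop already left by 'break'
      else
        let c := PySem.List.pyGetD buckets f 0
        let take := max 0 (min c (PySem.Int.floordiv st.2.1 f))
        (st.1 - take, st.2.1 - take * f, decide (take < c)))
    (distinct, rem, false)
  st.1

-- ===== PRECONDITION & SPEC =====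
-- Pre_ excludes exactly the inputs where A raises IndexError: num > len(ids) (arr[i] out of range).
def Pre_removeProduct (num : Int) (ids : List Int) (rem : Int) : Prop := num ≤ (ids.length : Int)
instance (num : Int) (ids : List Int) (rem : Int) : Decidable (Pre_removeProduct num ids rem) := by unfold Pre_removeProduct; infer_instance
def pvWitness_removeProduct : Int × List Int × Int := (3, [5, 7, 5], 2)

def Spec_removeProduct (num : Int) (ids : List Int) (rem : Int) (out : Int) : Prop := out = removeProduct_alt num ids rem
instance (num : Int) (ids : List Int) (rem : Int) (out : Int) : Decidable (Spec_removeProduct num ids rem out) := by unfold Spec_removeProduct; infer_instance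

-- ===== CLAIM (what is proved, stated in full; the proofs are below) =====
def Claim_equal_removeProduct : Prop := ∀ (num : Int) (ids : List Int) (rem : Int), Dom_removeProduct num ids rem → Pre_removeProduct num ids rem → Spec_removeProduct num ids rem (removeProduct num ids rem)

-- ===== LEMMAS AND PROOFS =====

-- shorthand for the data both ports compute: the counted prefix, its distinct ids, the count multiset
def pvPref (num : Int) (ids : List Int) : List Int := ids.take num.toNat
def pvKeys (num : Int) (ids : List Int) : List Int := PySem.Set.ofList (pvPref num ids)
def pvCs (num : Int) (ids : List Int) : List Int :=
  (pvKeys num ids).map (fun k => (((pvPref num ids).count k : Nat) : Int))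
def pvLA (num : Int) (ids : List Int) : List Int :=
  (PySem.List.sorted2 ((pvKeys num ids).map
      (fun k => ((((pvPref num ids).count k : Nat) : Int), k))) (·.1) (·.2)).map (·.1)
def pvLB (num : Int) (ids : List Int) : List Int :=
  ((PySem.List.pyRange 1 (num + 1) 1).map
      (fun f => List.replicate ((pvCs num ids).count f) f)).flatten

-- the number of elements a greedy left-to-right scan removes before the first failure
def pvGreedy : List Int → Int → Int
  | [], _ => 0
  | c :: t, mi => if c ≤ mi then pvGreedy t (mi - c) + 1 else 0

-- Python's lexicographic strict '<' on pairs, as sorted2 compares, and the matching '≤'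
def pvBf (a b : Int × Int) : Bool := decide (a.1 < b.1) || (!decide (b.1 < a.1) && decide (a.2 < b.2))
def pvLexle (a b : Int × Int) : Prop := a.1 < b.1 ∨ (a.1 = b.1 ∧ a.2 ≤ b.2)

theorem pvLexle_trans {a b c : Int × Int} (h1 : pvLexle a b) (h2 : pvLexle b c) : pvLexle a c := by
  simp only [pvLexle] at *; omega

theorem pvInsertBy_pairwise (x : Int × Int) (l : List (Int × Int))
    (h : l.Pairwise pvLexle) :
    (PySem.List.insertBy pvBf x l).Pairwise pvLexle := by
  induction l with
  | nil => simp [PySem.List.insertBy]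
  | cons y ys ih =>
    rw [PySem.List.insertBy]
    by_cases hb : pvBf x y = true
    · rw [if_pos hb]
      have hxy : pvLexle x y := by simp only [pvBf] at hb; simp only [pvLexle]; revert hb; simp; omega
      exact List.Pairwise.cons
        (fun z hz => by
          rcases List.mem_cons.1 hz with rfl | hz
          · exact hxy
          · exact pvLexle_trans hxy ((List.pairwise_cons.1 h).1 z hz)) h
    · rw [if_neg hb]
      have hyx : pvLexle y x := by
        simp only [pvBf] at hb; simp only [pvLexle]; revert hb; simp; omega
      rcases List.pairwise_cons.1 h with ⟨hy, hys⟩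
      exact List.Pairwise.cons
        (fun z hz => by
          rcases (PySem.List.mem_insertBy pvBf x z ys).1 hz with rfl | hz
          · exact hyx
          · exact hy z hz) (ih hys)

theorem pvSorted2_pairwise (l : List (Int × Int)) :
    (PySem.List.sorted2 l (·.1) (·.2)).Pairwise pvLexle := by
  have main : ∀ (ms : List (Int × Int)) (acc : List (Int × Int)), acc.Pairwise pvLexle →
      (ms.foldl (fun acc x => PySem.List.insertBy pvBf x acc) acc).Pairwise pvLexle := by
    intro ms
    induction ms with
    | nil => intro acc h; exact h
    | cons m t ih => intro acc h; exact ih _ (pvInsertBy_pairwise m acc h)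
  exact main l [] (by simp)

theorem pvFoldA_absorb (size : Int) (l : List (Int × Int)) (r : Int) :
    l.foldl (fun st p =>
        match st with
        | Sum.inr r => Sum.inr r
        | Sum.inl (mi, count) =>
            if p.1 ≤ mi then Sum.inl (mi - p.1, count + 1) else Sum.inr (size - count))
      (Sum.inr r : Sum (Int × Int) Int) = Sum.inr r := by
  induction l with
  | nil => rfl
  | cons p t ih => simpa using ih

-- A's early-return loop, as a fold with a Sum state, computes size - pvGreedy
theorem pvFoldA (size : Int) (l : List (Int × Int)) (mi count : Int) :
    (match l.foldl (fun st p =>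
        match st with
        | Sum.inr r => Sum.inr r
        | Sum.inl (mi, count) =>
            if p.1 ≤ mi then Sum.inl (mi - p.1, count + 1) else Sum.inr (size - count))
      (Sum.inl (mi, count) : Sum (Int × Int) Int) with
     | Sum.inl (_, c) => size - c
     | Sum.inr r => r) = size - (count + pvGreedy (l.map (·.1)) mi) := by
  induction l generalizing mi count with
  | nil => simp [pvGreedy]
  | cons p t ih =>
    by_cases h : p.1 ≤ mi
    · simp only [List.foldl_cons, List.map_cons, pvGreedy, if_pos h]
      rw [ih (mi - p.1) (count + 1)]; ring
    · simp only [List.foldl_cons, List.map_cons, pvGreedy, pvFoldA_absorb, if_neg h]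
      ring

-- a fold over range(num) reading ids[i] is a fold over the prefix ids.take num.toNat (num ≤ len ids)
theorem pvPrefixFold {β : Type} (num : Int) (ids : List Int) (h : num ≤ (ids.length : Int))
    (f : β → Int → β) (init : β) :
    (PySem.List.pyRange 0 num 1).foldl (fun acc i => f acc (PySem.List.pyGetD ids i 0)) init
      = (ids.take num.toNat).foldl f init := by
  by_cases h0 : 0 ≤ num
  · have hlen : ((ids.take num.toNat).length : Int) = num := by
      simp [List.length_take]; omega
    rw [show (PySem.List.pyRange 0 num 1) = PySem.List.pyRange 0 (PySem.List.len (ids.take num.toNat)) 1 by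
      simp only [PySem.List.len_eq, hlen]]
    rw [← PySem.List.foldl_pyRange_zero_pyGetD (ids.take num.toNat) 0 f init]
    apply PySem.List.foldl_congr_mem
    intro acc x hx
    rw [PySem.List.mem_pyRange_one] at hx
    simp only [PySem.List.len_eq] at hx
    rw [PySem.List.pyGetD_eq_getElem ids 0 hx.1 (by omega),
        PySem.List.pyGetD_eq_getElem (ids.take num.toNat) 0 hx.1 (by omega)]
    simp [List.getElem_take]
  · rw [PySem.List.pyRange_one_eq_nil (by omega), show ids.take num.toNat = [] by
      rw [Int.toNat_of_nonpos (by omega), List.take_zero]]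
    rfl

-- buckets[x] after the counting loop = (initial value) + multiplicity of x among vs
theorem pvBucketCount (vs : List Int) (bs : List Int) (x : Int)
    (hvs : ∀ w ∈ vs, 0 ≤ w ∧ w.toNat < bs.length) (hx : 0 ≤ x) (hxl : x.toNat < bs.length) :
    PySem.List.pyGetD (vs.foldl (fun bs f =>
        PySem.List.pySetD bs f (PySem.List.pyGetD bs f 0 + 1)) bs) x 0
      = PySem.List.pyGetD bs x 0 + (vs.count x : Int) := by
  induction vs generalizing bs with
  | nil => simp
  | cons w ws ih =>
    have hw := hvs w (by simp)
    rw [List.foldl_cons]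
    have hlen : (PySem.List.pySetD bs w (PySem.List.pyGetD bs w 0 + 1)).length = bs.length := by
      rw [PySem.List.pySetD_of_nonneg _ _ hw.1]; simp
    rw [ih _ (fun u hu => by rw [hlen]; exact hvs u (by simp [hu])) (by rw [hlen]; exact hxl)]
    have hset : PySem.List.pyGetD (PySem.List.pySetD bs w (PySem.List.pyGetD bs w 0 + 1)) x 0
        = if x.toNat = w.toNat then PySem.List.pyGetD bs w 0 + 1 else PySem.List.pyGetD bs x 0 := by
      rw [show (w : Int) = ((w.toNat : Nat) : Int) by omega, show (x : Int) = ((x.toNat : Nat) : Int) by omega]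
      rw [PySem.List.pyGetD_pySetD_natCast bs w.toNat x.toNat _ 0 hw.2]
      simp only [Int.toNat_of_nonneg hx, Int.toNat_of_nonneg hw.1]
    rw [hset]
    by_cases hxw : x = w
    · subst hxw; simp; omega
    · have : x.toNat ≠ w.toNat := by omega
      rw [if_neg this]
      rw [List.count_cons_of_ne (by exact fun hh => hxw hh.symm)]

-- B's loop step, with the bucket lookup abstracted into a multiplicity function
def pvStepB (cnt : Int → Nat) (st : Int × Int × Bool) (f : Int) : Int × Int × Bool :=
  if st.2.2 then st
  else
    let c := ((cnt f : Nat) : Int)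
    let take := max 0 (min c (PySem.Int.floordiv st.2.1 f))
    (st.1 - take, st.2.1 - take * f, decide (take < c))

theorem pvStepB_absorb (cnt : Int → Nat) (fs : List Int) (st : Int × Int × Bool)
    (h : st.2.2 = true) : fs.foldl (pvStepB cnt) st = st := by
  induction fs with
  | nil => rfl
  | cons f t ih => simp [List.foldl_cons, pvStepB, h, ih]

-- greedy over a constant block of k copies of f
theorem pvGreedyBlock (k : Nat) (f : Int) (hf : 0 < f) (tail : List Int) (left : Int) :
    pvGreedy (List.replicate k f ++ tail) left
      = max 0 (min (k : Int) (PySem.Int.floordiv left f))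
        + (if max 0 (min (k : Int) (PySem.Int.floordiv left f)) < (k : Int) then 0
           else pvGreedy tail (left - max 0 (min (k : Int) (PySem.Int.floordiv left f)) * f)) := by
  induction k generalizing left with
  | zero => simp
  | succ k ih =>
    by_cases h : f ≤ left
    · have hq1 : 1 ≤ PySem.Int.floordiv left f :=
        (PySem.Int.le_floordiv_iff_mul_le hf).2 (by omega)
      have hsub : PySem.Int.floordiv (left - f) f = PySem.Int.floordiv left f - 1 := by
        rw [PySem.Int.floordiv_eq_ediv_of_pos hf, PySem.Int.floordiv_eq_ediv_of_pos hf]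
        rw [show left - f = left + (-1) * f by ring, Int.add_mul_ediv_right _ _ (by omega)]
        ring
      rw [List.replicate_succ, List.cons_append, pvGreedy, if_pos h, ih (left - f)]
      rw [hsub]
      set q := PySem.Int.floordiv left f with hq
      have ht : max 0 (min ((k+1 : Nat) : Int) q) = max 0 (min (k : Int) (q - 1)) + 1 := by
        push_cast; omega
      rw [ht]
      have hcond : (max 0 (min (k : Int) (q - 1)) + 1 < ((k+1 : Nat) : Int)) ↔
          (max 0 (min (k : Int) (q - 1)) < (k : Int)) := by push_cast; omega
      by_cases hc : max 0 (min (k : Int) (q - 1)) < (k : Int)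
      · rw [if_pos hc, if_pos (hcond.2 hc)]; ring
      · rw [if_neg hc, if_neg (fun hx => hc (hcond.1 hx))]
        have : left - (max 0 (min (k : Int) (q - 1)) + 1) * f = left - f - max 0 (min (k : Int) (q - 1)) * f := by ring
        rw [this]; ring
    · have hq0 : PySem.Int.floordiv left f < 1 :=
        (PySem.Int.floordiv_lt_iff_lt_mul hf).2 (by omega)
      have ht : max 0 (min ((k+1 : Nat) : Int) (PySem.Int.floordiv left f)) = 0 := by push_cast; omega
      rw [List.replicate_succ, List.cons_append, pvGreedy, if_neg h, ht]
      rw [if_pos (by push_cast; omega)]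
      ring

-- B's bucket loop computes d - pvGreedy over the flattened constant blocks
theorem pvFoldB (cnt : Int → Nat) (fs : List Int) (hfs : ∀ f ∈ fs, 0 < f) (d left : Int) :
    (fs.foldl (pvStepB cnt) (d, left, false)).1
      = d - pvGreedy ((fs.map (fun f => List.replicate (cnt f) f)).flatten) left := by
  induction fs generalizing d left with
  | nil => simp [pvGreedy]
  | cons f t ih =>
    have hf : 0 < f := hfs f (by simp)
    have hft : ∀ g ∈ t, 0 < g := fun g hg => hfs g (by simp [hg])
    rw [List.foldl_cons, List.map_cons, List.flatten_cons,
        pvGreedyBlock (cnt f) f hf _ left]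
    set q := PySem.Int.floordiv left f with hq
    set tk := max 0 (min ((cnt f : Nat) : Int) q) with htk
    rw [show pvStepB cnt (d, left, false) f
        = (d - tk, left - tk * f, decide (tk < (cnt f : Int))) by
      simp [pvStepB, htk, hq]]
    by_cases hc : tk < (cnt f : Int)
    · rw [pvStepB_absorb cnt t _ (by simp [hc])]
      rw [if_pos hc]; ring
    · rw [show decide (tk < (cnt f : Int)) = false by simp [hc]]
      rw [ih hft (d - tk) (left - tk * f), if_neg hc]; ring

-- multiplicities in a flattened list of constant blocks over distinct f's
theorem pvFlattenCount (fs : List Int) (g : Int → Nat) (hnd : fs.Nodup) (x : Int) :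
    ((fs.map (fun f => List.replicate (g f) f)).flatten).count x
      = if x ∈ fs then g x else 0 := by
  induction fs with
  | nil => simp
  | cons f t ih =>
    simp only [List.map_cons, List.flatten_cons, List.count_append, List.count_replicate]
    rw [ih hnd.of_cons]
    by_cases hx : x = f
    · subst hx
      have : x ∉ t := (List.nodup_cons.1 hnd).1
      simp [this]
    · simp [hx, Ne.symm hx, List.mem_cons]

-- every multiplicity in pvCs lies between 1 and len(prefix)
theorem pvCsBounds (num : Int) (ids : List Int) (w : Int) (hw : w ∈ pvCs num ids) :
    1 ≤ w ∧ w ≤ ((pvPref num ids).length : Int) := by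
  rcases List.mem_map.1 hw with ⟨k, hk, rfl⟩
  have hkmem : k ∈ pvPref num ids := (PySem.Set.mem_ofList _ _).1 hk
  constructor
  · exact_mod_cast List.count_pos_iff.2 hkmem
  · exact_mod_cast List.count_le_length

theorem pvA_char (num : Int) (ids : List Int) (rem : Int) (h : num ≤ (ids.length : Int)) :
    removeProduct num ids rem = ((pvKeys num ids).length : Int) - pvGreedy (pvLA num ids) rem := by
  unfold removeProduct
  -- 1. the counting dict is counter(prefix)
  have hdict : (PySem.List.pyRange 0 num 1).foldl (fun m i =>
      let x := PySem.List.pyGetD ids i 0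
      match m.get? x with
      | some c => m.insert x (c + 1)
      | none => m.insert x 1) (PySem.Dict.empty : PySem.Dict Int Int)
      = PySem.Dict.counter (pvPref num ids) := by
    rw [PySem.List.foldl_congr_mem _ _
        (fun m i => m.insert (PySem.List.pyGetD ids i 0) (m.getD (PySem.List.pyGetD ids i 0) 0 + 1)) _
        (by
          intro acc x _
          cases hg : acc.get? (PySem.List.pyGetD ids x 0) <;>
            simp [PySem.Dict.getD_eq_get?_getD, hg])]
    rw [pvPrefixFold num ids h (fun (d : PySem.Dict Int Int) x => d.insert x (d.getD x 0 + 1)) PySem.Dict.empty]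
    exact PySem.Dict.foldl_insert_getD_add_one_eq_counter (pvPref num ids)
  rw [hdict]
  simp only []
  -- 2. v is keys paired with counts
  rw [PySem.List.foldl_append_singleton_eq_map]
  simp only [PySem.Dict.keys_counter, PySem.Dict.getD_counter, List.nil_append]
  -- 3. the greedy loop
  set v2 := PySem.List.sorted2 ((PySem.Set.ofList (pvPref num ids)).map
      (fun k => ((((pvPref num ids).count k : Nat) : Int), k))) (·.1) (·.2) with hv2
  rw [PySem.List.foldl_pyRange_zero_pyGetD v2 ((0:Int), (0:Int))
      (fun st (p : Int × Int) => match st with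
        | Sum.inr r => Sum.inr r
        | Sum.inl (mi, count) =>
            if p.1 ≤ mi then Sum.inl (mi - p.1, count + 1)
            else Sum.inr (PySem.List.len v2 - count))
      (Sum.inl (rem, (0 : Int)))]
  rw [pvFoldA (PySem.List.len v2) v2 rem 0]
  rw [pvLA]
  have hlen : v2.length = (pvKeys num ids).length := by
    rw [hv2, (PySem.List.sorted2_perm _ _ _ _).length_eq, List.length_map, pvKeys]
  have hlen2 : PySem.List.len v2 = ((pvKeys num ids).length : Int) := by
    simp only [PySem.List.len_eq, hlen]
  rw [hlen2, pvKeys, ← hv2]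
  ring

theorem pvB_char (num : Int) (ids : List Int) (rem : Int) (h : num ≤ (ids.length : Int)) :
    removeProduct_alt num ids rem = ((pvKeys num ids).length : Int) - pvGreedy (pvLB num ids) rem := by
  unfold removeProduct_alt
  rw [pvPrefixFold num ids h (fun (d : PySem.Dict Int Int) x => d.insert x (d.getD x 0 + 1)) PySem.Dict.empty,
      PySem.Dict.foldl_insert_getD_add_one_eq_counter]
  rw [show List.take num.toNat ids = pvPref num ids from rfl]
  simp only []
  -- the values list is pvCs, the size is the number of distinct ids
  have hvals : (PySem.Dict.counter (pvPref num ids)).values = pvCs num ids := by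
    simp only [PySem.Dict.values, PySem.Dict.items_counter, List.map_map]
    rw [pvCs, pvKeys]
    rfl
  have hsize : ((PySem.Dict.counter (pvPref num ids)).size : Int) = ((pvKeys num ids).length : Int) := by
    simp only [PySem.Dict.size, PySem.Dict.items_counter, List.length_map, pvKeys]
  rw [hvals, hsize, PySem.List.pyRepeat_singleton]
  set bks := (pvCs num ids).foldl (fun bs f =>
      PySem.List.pySetD bs f (PySem.List.pyGetD bs f 0 + 1)) (List.replicate (num + 1).toNat (0 : Int)) with hbks
  have hbuck : ∀ f ∈ PySem.List.pyRange 1 (num + 1) 1,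
      PySem.List.pyGetD bks f 0 = (((pvCs num ids).count f : Nat) : Int) := by
    intro f hf
    rw [PySem.List.mem_pyRange_one] at hf
    have hpreflen : ((pvPref num ids).length : Int) ≤ max num 0 := by
      simp [pvPref, List.length_take]; omega
    have hvs : ∀ w ∈ pvCs num ids, 0 ≤ w ∧ w.toNat < (List.replicate (num + 1).toNat (0 : Int)).length := by
      intro w hw
      have := pvCsBounds num ids w hw
      simp only [List.length_replicate]
      omega
    rw [hbks, pvBucketCount (pvCs num ids) (List.replicate (num + 1).toNat (0 : Int)) f hvs
        (by omega) (by simp only [List.length_replicate]; omega)]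
    rw [PySem.List.pyGetD_eq_getElem _ 0 (by omega) (by simp only [List.length_replicate]; omega)]
    simp
  rw [PySem.List.foldl_congr_mem _ _ (pvStepB (fun f => (pvCs num ids).count f)) _
      (by
        intro st f hf
        simp only [pvStepB, hbuck f hf])]
  rw [pvFoldB _ _ (fun f hf => by rw [PySem.List.mem_pyRange_one] at hf; omega) _ rem]
  rw [pvLB]

theorem pvCs_mem_range (num : Int) (ids : List Int)
    (w : Int) (hw : w ∈ pvCs num ids) : w ∈ PySem.List.pyRange 1 (num + 1) 1 := by
  have hb := pvCsBounds num ids w hw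
  have hlen : ((pvPref num ids).length : Int) ≤ max num 0 := by
    simp [pvPref, List.length_take]; omega
  rw [PySem.List.mem_pyRange_one]
  omega

theorem pvLA_eq_pvLB (num : Int) (ids : List Int) :
    pvLA num ids = pvLB num ids := by
  have hpermA : (pvLA num ids).Perm (pvCs num ids) := by
    have h1 := (PySem.List.sorted2_perm ((pvKeys num ids).map
      (fun k => ((((pvPref num ids).count k : Nat) : Int), k))) (·.1) (·.2) false).map (·.1)
    rw [List.map_map] at h1
    rw [pvLA, pvCs]
    exact h1
  have hpermB : (pvLB num ids).Perm (pvCs num ids) := by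
    rw [List.perm_iff_count]
    intro a
    rw [pvLB, pvFlattenCount _ _ (PySem.List.nodup_pyRange_one 1 (num+1)) a]
    by_cases ha : a ∈ PySem.List.pyRange 1 (num + 1) 1
    · rw [if_pos ha]
    · rw [if_neg ha]
      exact (List.count_eq_zero.2 (fun hmem => ha (pvCs_mem_range num ids a hmem))).symm
  have hpwA : (pvLA num ids).Pairwise (· ≤ ·) := by
    rw [pvLA, List.pairwise_map]
    exact (pvSorted2_pairwise _).imp (fun hab => by rcases hab with h1 | h2 <;> omega)
  have hpwB : (pvLB num ids).Pairwise (· ≤ ·) := by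
    rw [pvLB]
    rw [List.pairwise_flatten]
    constructor
    · intro l hl
      rcases List.mem_map.1 hl with ⟨f, _, rfl⟩
      exact List.pairwise_replicate.2 (Or.inr le_rfl)
    · rw [List.pairwise_map]
      exact (PySem.List.pairwise_lt_pyRange_one 1 (num+1)).imp
        (fun {f1 f2} hlt => fun x hx y hy => by
          rw [List.eq_of_mem_replicate hx, List.eq_of_mem_replicate hy]; omega)
  exact List.Perm.eq_of_pairwise (fun a b _ _ h1 h2 => le_antisymm h1 h2)
    hpwA hpwB (hpermA.trans hpermB.symm)

-- ===== VERDICT (by name: the statement is the Claim_ definition above) =====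
theorem removeProduct_spec : Claim_equal_removeProduct := by
  intro num ids rem _ hpre
  unfold Spec_removeProduct
  rw [pvA_char num ids rem hpre, pvB_char num ids rem hpre, pvLA_eq_pvLB num ids]
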